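-- pv_equiv track=rewrite | github.com/thijstriemstra/AceTime | tools/zone_agent.py | get_candidate_years
-- ===== SOURCE A (Python) =====
-- def get_candidate_years(from_year, to_year, start_year, end_year):
--     """Return the array of years within the Rule's [from_year, to_year] range
--     which should be evaluated to obtain the transitions necessary for the
--     matched ZoneEra that spans [start_year, end_year].
--         1) Include all years which overlap [start_year, end_year].
--         2) Add the latest year prior to [start_year]. This is guaranteed to
--         exists because we added an anchor rule at year 0 for those zone policies
--         that need it.
--     If [start_year, end_year] spans a 3-year interval (which will always
--     be the case), then the maximum number of elements in 'years' will be 4.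
--     """
--     years = set()
--     for year in range(start_year, end_year+1):
--         if from_year <= year and year <= to_year:
--             years.add(year)
--
--     if from_year < start_year:
--         if to_year < start_year:
--             years.add(to_year)
--         else:
--             years.add(start_year - 1)
--     return years
-- ===== SOURCE B (Python) =====
-- def get_candidate_years(from_year, to_year, start_year, end_year):
--     # Merge-intersect the two ascending year sequences with two galloping
--     # cursors: whichever cursor is behind jumps to the other; on a match the
--     # year is emitted and both advance. Loop iterations are proportional to the overlap, not the span.
--     years = set()
--     a = start_year
--     b = from_year
--     while a <= end_year and b <= to_year:
--         if a < b:
--             a = b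
--         elif b < a:
--             b = a
--         else:
--             years.add(a)
--             a += 1
--             b += 1
--     if from_year < start_year:
--         if to_year < start_year:
--             years.add(to_year)
--         else:
--             years.add(start_year - 1)
--     return years
-- ===== Notes on version B (the rewrite author's own statement) =====
-- stated objective: alternative
-- what changed: Replaces A's scan of every year in [start_year, end_year] with a membership test by a two-cursor galloping merge of the two ascending year sequences: the lagging cursor jumps to the leading one and a year is emitted only when the cursors meet, so the loop iterates proportionally to the overlap rather than the era span; the anchor block is unchanged.
import Mathlib
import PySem

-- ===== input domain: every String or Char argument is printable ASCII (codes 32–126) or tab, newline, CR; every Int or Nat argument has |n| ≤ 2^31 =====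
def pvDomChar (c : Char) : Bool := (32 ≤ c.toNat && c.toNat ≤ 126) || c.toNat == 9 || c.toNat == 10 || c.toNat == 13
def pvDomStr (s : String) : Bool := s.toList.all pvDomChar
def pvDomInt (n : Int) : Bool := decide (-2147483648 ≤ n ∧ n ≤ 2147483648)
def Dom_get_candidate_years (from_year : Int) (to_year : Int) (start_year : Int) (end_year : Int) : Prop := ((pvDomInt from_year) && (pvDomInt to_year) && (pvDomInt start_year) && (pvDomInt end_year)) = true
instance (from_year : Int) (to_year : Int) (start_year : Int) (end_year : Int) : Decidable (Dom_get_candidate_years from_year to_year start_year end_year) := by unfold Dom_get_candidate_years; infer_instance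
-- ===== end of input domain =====

-- B replaces A's scan-every-year-and-test loop with a two-cursor galloping merge of the two ascending year sequences (loop iterations proportional to the overlap, not the era span); the anchor block is unchanged.


-- ===== PORT A =====
def get_candidate_years (from_year : Int) (to_year : Int) (start_year : Int) (end_year : Int) : List Int :=
  let years : PySem.Set Int :=
    (PySem.List.pyRange start_year (end_year + 1) 1).foldl
      (fun ys year =>
        if from_year ≤ year ∧ year ≤ to_year then PySem.Set.add ys year else ys)
      PySem.Set.empty
  if from_year < start_year then
    if to_year < start_year then PySem.Set.add years to_year
    else PySem.Set.add years (start_year - 1)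
  else years

-- ===== PORT B =====
-- Source B's while loop; the Nat fuel only makes the same computation total
-- ((e+1-a).toNat + (t+1-b).toNat strictly decreases at every iteration).
def pvGallop (end_year to_year : Int) : Nat → Int → Int → PySem.Set Int → PySem.Set Int
  | 0, _, _, ys => ys
  | n + 1, a, b, ys =>
    if a ≤ end_year ∧ b ≤ to_year then
      if a < b then pvGallop end_year to_year n b b ys
      else if b < a then pvGallop end_year to_year n a a ys
      else pvGallop end_year to_year n (a + 1) (b + 1) (PySem.Set.add ys a)
    else ys

def get_candidate_years_alt (from_year : Int) (to_year : Int) (start_year : Int) (end_year : Int) : List Int :=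
  let years : PySem.Set Int :=
    pvGallop end_year to_year
      ((end_year + 1 - start_year).toNat + (to_year + 1 - from_year).toNat)
      start_year from_year PySem.Set.empty
  if from_year < start_year then
    if to_year < start_year then PySem.Set.add years to_year
    else PySem.Set.add years (start_year - 1)
  else years

-- ===== PRECONDITION & SPEC =====
def Spec_get_candidate_years (from_year : Int) (to_year : Int) (start_year : Int) (end_year : Int) (out : List Int) : Prop := out = get_candidate_years_alt from_year to_year start_year end_year
instance (from_year : Int) (to_year : Int) (start_year : Int) (end_year : Int) (out : List Int) : Decidable (Spec_get_candidate_years from_year to_year start_year end_year out) := by unfold Spec_get_candidate_years; infer_instance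

-- ===== CLAIM (what is proved, stated in full; the proofs are below) =====
def Claim_equal_get_candidate_years : Prop := ∀ (from_year : Int) (to_year : Int) (start_year : Int) (end_year : Int), Dom_get_candidate_years from_year to_year start_year end_year → Spec_get_candidate_years from_year to_year start_year end_year (get_candidate_years from_year to_year start_year end_year)

-- ===== LEMMAS AND PROOFS =====

-- Set.add appends when the element is not already present.
theorem pv_add_eq_append (s : List Int) (a : Int) (h : a ∉ s) :
    PySem.Set.add s a = s ++ [a] := by
  simp [PySem.Set.add, PySem.Set.contains, h]

-- A's filtered fold over [a, b) equals the closed-form intersected range appended to acc.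
theorem pv_fold_eq_range (f t : Int) : ∀ (n : Nat) (a b : Int), (b - a).toNat = n →
    ∀ (acc : List Int), (∀ x ∈ acc, x < a) →
    (PySem.List.pyRange a b 1).foldl
      (fun ys year => if f ≤ year ∧ year ≤ t then PySem.Set.add ys year else ys) acc
      = acc ++ PySem.List.pyRange (max a f) (min b (t + 1)) 1 := by
  intro n
  induction n with
  | zero =>
    intro a b hn acc hacc
    have hba : b ≤ a := by omega
    rw [PySem.List.pyRange_one_eq_nil hba,
        PySem.List.pyRange_one_eq_nil (by omega : min b (t+1) ≤ max a f)]
    simp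
  | succ n ih =>
    intro a b hn acc hacc
    have hab : a < b := by omega
    rw [PySem.List.pyRange_one_cons hab]
    simp only [List.foldl_cons]
    by_cases hcond : f ≤ a ∧ a ≤ t
    · have hnot : a ∉ acc := fun hx => absurd (hacc a hx) (by omega)
      have hacc' : ∀ x ∈ acc ++ [a], x < a + 1 := by
        intro x hx
        rcases List.mem_append.mp hx with h1 | h1
        · have := hacc x h1; omega
        · simp at h1; omega
      rw [if_pos hcond, pv_add_eq_append acc a hnot,
          ih (a+1) b (by omega) (acc ++ [a]) hacc']
      have h1 : max a f = a := by omega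
      have h2 : max (a+1) f = a + 1 := by omega
      have h3 : a < min b (t+1) := by omega
      rw [h1, h2, PySem.List.pyRange_one_cons h3]
      simp
    · have hacc' : ∀ x ∈ acc, x < a + 1 := by intro x hx; have := hacc x hx; omega
      rw [if_neg hcond, ih (a+1) b (by omega) acc hacc']
      by_cases hf : a < f
      · have : max a f = max (a+1) f := by omega
        rw [this]
      · have ht : t < a := by omega
        rw [PySem.List.pyRange_one_eq_nil (by omega : min b (t+1) ≤ max (a+1) f),
            PySem.List.pyRange_one_eq_nil (by omega : min b (t+1) ≤ max a f)]

-- B's galloping merge equals the same intersected range appended to ys.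
theorem pv_gallop_eq_range (e t : Int) : ∀ (n : Nat) (a b : Int),
    (e + 1 - a).toNat + (t + 1 - b).toNat ≤ n →
    ∀ (ys : List Int), (∀ x ∈ ys, x < max a b) →
    pvGallop e t n a b ys = ys ++ PySem.List.pyRange (max a b) (min e t + 1) 1 := by
  intro n
  induction n with
  | zero =>
    intro a b hn ys _
    rw [PySem.List.pyRange_one_eq_nil (by omega : min e t + 1 ≤ max a b)]
    simp [pvGallop]
  | succ n ih =>
    intro a b hn ys hys
    rw [pvGallop]
    by_cases hcond : a ≤ e ∧ b ≤ t
    · rw [if_pos hcond]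
      by_cases hab : a < b
      · rw [if_pos hab, ih b b (by omega) ys (by
          intro x hx; have := hys x hx; omega)]
        have : max b b = max a b := by omega
        rw [this]
      · rw [if_neg hab]
        by_cases hba : b < a
        · rw [if_pos hba, ih a a (by omega) ys (by
            intro x hx; have := hys x hx; omega)]
          have : max a a = max a b := by omega
          rw [this]
        · have heq : a = b := by omega
          have hnot : a ∉ ys := fun hx => absurd (hys a hx) (by omega)
          have hys' : ∀ x ∈ ys ++ [a], x < max (a+1) (b+1) := by
            intro x hx
            rcases List.mem_append.mp hx with h1 | h1
            · have := hys x h1; omega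
            · simp at h1; omega
          rw [if_neg hba, pv_add_eq_append ys a hnot,
              ih (a+1) (b+1) (by omega) (ys ++ [a]) hys']
          have h1 : max a b = a := by omega
          have h2 : max (a+1) (b+1) = a + 1 := by omega
          have h3 : a < min e t + 1 := by omega
          rw [h1, h2, PySem.List.pyRange_one_cons h3]
          simp
    · rw [if_neg hcond,
          PySem.List.pyRange_one_eq_nil (by omega : min e t + 1 ≤ max a b)]
      simp

-- ===== VERDICT (by name: the statement is the Claim_ definition above) =====
theorem get_candidate_years_spec : Claim_equal_get_candidate_years := by
  intro f t s e _hdom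
  unfold Spec_get_candidate_years get_candidate_years get_candidate_years_alt
  have hA := pv_fold_eq_range f t (e + 1 - s).toNat s (e + 1) rfl [] (by simp)
  have hB := pv_gallop_eq_range e t
      ((e + 1 - s).toNat + (t + 1 - f).toNat) s f (le_refl _) [] (by simp)
  have hmin : min (e + 1) (t + 1) = min e t + 1 := by omega
  rw [hmin] at hA
  simp only [List.nil_append] at hA hB
  simp only [PySem.Set.empty, hA, hB]
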